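-- pv_equiv track=rewrite | github.com/seferlab/sepprediction | sORFs_features/fss/sorfpred/get_RNA.py | SNR_feature
-- ===== SOURCE A (Python) =====
-- def SNR_feature(s):
--     Ua = []
--     Ut = []
--     Uc = []
--     Ug = []
--     for i in s:
--         if i == 'A':
--             Ua.append(1)
--             Ut.append(0)
--             Uc.append(0)
--             Ug.append(0)
--         elif i == 'T':
--             Ua.append(0)
--             Ut.append(1)
--             Uc.append(0)
--             Ug.append(0)
--         elif i == 'C':
--             Ua.append(0)
--             Ut.append(0)
--             Uc.append(1)
--             Ug.append(0)
--         else: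
--             Ua.append(0)
--             Ut.append(0)
--             Uc.append(0)
--             Ug.append(1)
--     return Ua, Ut, Uc, Ug
-- ===== SOURCE B (Python) =====
-- def SNR_feature(s):
--     Ua = [1 if c == 'A' else 0 for c in s]
--     Ut = [1 if c == 'T' else 0 for c in s]
--     Uc = [1 if c == 'C' else 0 for c in s]
--     Ug = [0 if c in ('A', 'T', 'C') else 1 for c in s]
--     return Ua, Ut, Uc, Ug
-- ===== Notes on version B (the rewrite author's own statement) =====
-- stated objective: idiomatic
-- what changed: Replaces the single four-accumulator branching loop with four independent one-pass list comprehensions, one per nucleotide indicator (Ug as the complement of {A,T,C}).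
import Mathlib
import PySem

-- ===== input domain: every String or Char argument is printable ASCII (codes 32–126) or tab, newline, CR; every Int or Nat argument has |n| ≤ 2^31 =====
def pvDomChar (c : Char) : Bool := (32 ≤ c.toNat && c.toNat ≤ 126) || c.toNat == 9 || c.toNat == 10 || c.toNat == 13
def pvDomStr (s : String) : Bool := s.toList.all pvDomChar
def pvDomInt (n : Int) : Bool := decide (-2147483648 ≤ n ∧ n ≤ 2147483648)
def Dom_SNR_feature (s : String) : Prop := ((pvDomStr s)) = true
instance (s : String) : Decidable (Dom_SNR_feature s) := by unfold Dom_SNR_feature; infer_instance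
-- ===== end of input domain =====

-- B replaces A's single four-accumulator branching loop with four independent per-nucleotide comprehensions (idiomatic; same cost).


-- ===== PORT A =====
-- one loop over the characters, four accumulator lists appended to per branch
def SNR_feature (s : String) : List Int × List Int × List Int × List Int :=
  s.toList.foldl
    (fun (st : List Int × List Int × List Int × List Int) i =>
      if i = 'A' then (st.1 ++ [1], st.2.1 ++ [0], st.2.2.1 ++ [0], st.2.2.2 ++ [0])
      else if i = 'T' then (st.1 ++ [0], st.2.1 ++ [1], st.2.2.1 ++ [0], st.2.2.2 ++ [0])
      else if i = 'C' then (st.1 ++ [0], st.2.1 ++ [0], st.2.2.1 ++ [1], st.2.2.2 ++ [0])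
      else (st.1 ++ [0], st.2.1 ++ [0], st.2.2.1 ++ [0], st.2.2.2 ++ [1]))
    ([], [], [], [])

-- ===== PORT B =====
-- four independent comprehensions, one per indicator
def SNR_feature_alt (s : String) : List Int × List Int × List Int × List Int :=
  (s.toList.map (fun c => if c = 'A' then (1 : Int) else 0),
   s.toList.map (fun c => if c = 'T' then (1 : Int) else 0),
   s.toList.map (fun c => if c = 'C' then (1 : Int) else 0),
   s.toList.map (fun c => if c = 'A' ∨ c = 'T' ∨ c = 'C' then (0 : Int) else 1))

-- ===== PRECONDITION & SPEC =====
def Spec_SNR_feature (s : String) (out : List Int × List Int × List Int × List Int) : Prop := out = SNR_feature_alt s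
instance (s : String) (out : List Int × List Int × List Int × List Int) : Decidable (Spec_SNR_feature s out) := by unfold Spec_SNR_feature; infer_instance

-- ===== CLAIM (what is proved, stated in full; the proofs are below) =====
def Claim_equal_SNR_feature : Prop := ∀ (s : String), Dom_SNR_feature s → Spec_SNR_feature s (SNR_feature s)

-- ===== LEMMAS AND PROOFS =====
theorem SNR_foldl_acc (l : List Char) (a b c d : List Int) :
    l.foldl
      (fun (st : List Int × List Int × List Int × List Int) i =>
        if i = 'A' then (st.1 ++ [1], st.2.1 ++ [0], st.2.2.1 ++ [0], st.2.2.2 ++ [0])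
        else if i = 'T' then (st.1 ++ [0], st.2.1 ++ [1], st.2.2.1 ++ [0], st.2.2.2 ++ [0])
        else if i = 'C' then (st.1 ++ [0], st.2.1 ++ [0], st.2.2.1 ++ [1], st.2.2.2 ++ [0])
        else (st.1 ++ [0], st.2.1 ++ [0], st.2.2.1 ++ [0], st.2.2.2 ++ [1]))
      (a, b, c, d)
    = (a ++ l.map (fun x => if x = 'A' then (1 : Int) else 0),
       b ++ l.map (fun x => if x = 'T' then (1 : Int) else 0),
       c ++ l.map (fun x => if x = 'C' then (1 : Int) else 0),
       d ++ l.map (fun x => if x = 'A' ∨ x = 'T' ∨ x = 'C' then (0 : Int) else 1)) := by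
  induction l generalizing a b c d with
  | nil => simp
  | cons x xs ih =>
    simp only [List.foldl_cons, List.map_cons]
    by_cases hA : x = 'A'
    · simp [hA, ih]
    · by_cases hT : x = 'T'
      · simp [hT, ih]
      · by_cases hC : x = 'C'
        · simp [hA, hC, ih]
        · simp [hA, hT, hC, ih]

-- ===== VERDICT (by name: the statement is the Claim_ definition above) =====
theorem SNR_feature_spec : Claim_equal_SNR_feature := by
  intro s _
  unfold Spec_SNR_feature SNR_feature SNR_feature_alt
  simpa using SNR_foldl_acc s.toList [] [] [] []
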